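-- pv_equiv track=rewrite | github.com/grootwo/Python-algorithm-studying | array_1/print_ox_grade.py | count_grade
-- ===== SOURCE A (Python) =====
-- def count_grade(result):
--     grade = 0
--     plus = 1
--     for i in result:
--         if i == 'O':
--             grade += plus
--             plus += 1
--         else:
--             plus = 1
--     return grade
-- ===== SOURCE B (Python) =====
-- def count_grade(result):
--     grade = 0
--     i = 0
--     n = len(result)
--     while i < n:
--         j = i + 1
--         while j < n and result[j] == result[i]:
--             j += 1
--         if result[i] == 'O':
--             L = j - i
--             grade += L * (L + 1) // 2
--         i = j
--     return grade
-- ===== Notes on version B (the rewrite author's own statement) =====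
-- stated objective: alternative
-- what changed: Replaces the per-element streak accumulator with grouping the list into maximal runs of equal elements and adding the closed-form triangular number L*(L+1)//2 for each 'O' run.
import Mathlib
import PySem

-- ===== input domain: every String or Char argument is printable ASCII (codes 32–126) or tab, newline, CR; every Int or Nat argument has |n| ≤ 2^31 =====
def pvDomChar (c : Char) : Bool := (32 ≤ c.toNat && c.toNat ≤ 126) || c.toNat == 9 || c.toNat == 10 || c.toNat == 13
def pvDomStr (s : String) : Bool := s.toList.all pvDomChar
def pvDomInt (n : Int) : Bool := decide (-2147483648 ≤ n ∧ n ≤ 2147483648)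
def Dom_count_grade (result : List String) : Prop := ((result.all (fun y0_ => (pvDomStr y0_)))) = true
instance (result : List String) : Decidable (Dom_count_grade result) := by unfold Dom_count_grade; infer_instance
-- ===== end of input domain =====

-- B groups the list into maximal runs of equal elements and adds the closed-form
-- triangular number L*(L+1)//2 for each 'O' run; same O(n) cost, different decomposition.

-- ===== PORT A =====
-- A: single pass with a streak accumulator `plus`, reset on non-'O'.
def count_grade (result : List String) : Int :=
  (result.foldl
    (fun (s : Int × Int) i =>
      if i == "O" then (s.1 + s.2, s.2 + 1) else (s.1, 1))
    (0, 1)).1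

-- ===== PORT B =====
-- B: consume one maximal run of equal elements per step; an 'O'-run of length L
-- contributes L*(L+1)/2 (Nat division, exact as Python's // on nonnegatives).
def count_grade_alt (result : List String) : Int :=
  match result with
  | [] => 0
  | x :: xs =>
    let L : Nat := (xs.takeWhile (fun y => y == x)).length + 1
    let rest := xs.dropWhile (fun y => y == x)
    (if x == "O" then ((L * (L + 1) / 2 : Nat) : Int) else 0) + count_grade_alt rest
termination_by result.length
decreasing_by
  simpa using Nat.lt_succ_of_le (List.length_dropWhile_le _ _)

-- ===== PRECONDITION & SPEC =====
def Spec_count_grade (result : List String) (out : Int) : Prop := out = count_grade_alt result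
instance (result : List String) (out : Int) : Decidable (Spec_count_grade result out) := by unfold Spec_count_grade; infer_instance

-- ===== CLAIM (what is proved, stated in full; the proofs are below) =====
def Claim_equal_count_grade : Prop := ∀ (result : List String), Dom_count_grade result → Spec_count_grade result (count_grade result)

-- ===== LEMMAS AND PROOFS =====

-- structural rendering of A's loop: result's contribution when the streak counter is p
def go2 : List String → Int → Int
  | [], _ => 0
  | x :: xs, p => if x == "O" then p + go2 xs (p + 1) else go2 xs 1

-- triangular number as Int (matches B's L*(L+1)/2 on Nat)
def tri (n : Nat) : Int := ((n * (n + 1) / 2 : Nat) : Int)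

theorem tri_succ (k : Nat) : tri (k + 1) = tri k + (k + 1) := by
  unfold tri
  have h2 : 2 ∣ k * (k + 1) := (Nat.even_mul_succ_self k).two_dvd
  obtain ⟨b, hb⟩ := h2
  have h : (k + 1) * (k + 1 + 1) = 2 * b + 2 * (k + 1) := by rw [← hb]; ring
  have : (k + 1) * (k + 1 + 1) / 2 = b + (k + 1) := by omega
  rw [this]
  have : k * (k + 1) / 2 = b := by omega
  rw [this]
  push_cast
  ring

theorem foldl_fst (l : List String) (g p : Int) :
    (l.foldl (fun (s : Int × Int) i =>
      if i == "O" then (s.1 + s.2, s.2 + 1) else (s.1, 1)) (g, p)).1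
    = g + go2 l p := by
  induction l generalizing g p with
  | nil => simp [go2]
  | cons x xs ih =>
    rw [List.foldl_cons]
    by_cases hx : x = "O"
    · subst hx
      have hstep : (if (("O" : String) == "O") = true
          then ((g, p).1 + (g, p).2, (g, p).2 + 1) else ((g, p).1, 1)) = (g + p, p + 1) := by
        simp
      rw [hstep, ih]
      simp [go2]
      omega
    · have hstep : (if (x == "O") = true
          then ((g, p).1 + (g, p).2, (g, p).2 + 1) else ((g, p).1, 1)) = (g, 1) := by
        simp [hx]
      rw [hstep, ih]
      simp [go2, hx]

-- skipping equal non-'O' elements one at a time agrees with grouped skipping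
theorem alt_skip (x : String) (xs : List String) (hx : ¬ x = "O") :
    count_grade_alt (x :: xs) = count_grade_alt xs := by
  rw [count_grade_alt]
  simp only [beq_iff_eq, hx, if_false, zero_add]
  cases xs with
  | nil => simp
  | cons y ys =>
    by_cases hy : y = x
    · subst hy
      rw [List.dropWhile_cons]
      simp only [beq_self_eq_true]
      conv_rhs => rw [count_grade_alt]
      simp [hx]
    · rw [List.dropWhile_cons]
      simp [hy]

-- B's value decomposes along the leading 'O'-run
theorem alt_decomp (l : List String) :
    count_grade_alt l =
      tri (l.takeWhile (fun y => y == "O")).length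
        + count_grade_alt (l.dropWhile (fun y => y == "O")) := by
  cases l with
  | nil => simp [count_grade_alt, tri]
  | cons x xs =>
    by_cases hx : x = "O"
    · subst hx
      conv_lhs => rw [count_grade_alt]
      simp [tri]
    · simp [hx, tri]

-- main invariant: A's remaining contribution with streak k+1 vs B, mid-run with k prior 'O's
theorem go2_eq (l : List String) (k : Nat) :
    go2 l ((k : Int) + 1) + tri k
      = tri (k + (l.takeWhile (fun y => y == "O")).length)
        + count_grade_alt (l.dropWhile (fun y => y == "O")) := by
  induction l generalizing k with
  | nil => simp [go2, count_grade_alt]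
  | cons x xs ih =>
    by_cases hx : x = "O"
    · subst hx
      have ihk := ih (k + 1)
      rw [List.takeWhile_cons, List.dropWhile_cons]
      simp only [beq_self_eq_true, if_true, List.length_cons]
      rw [go2]
      simp only [beq_self_eq_true, if_true]
      have hp : ((k : Int) + 1) + 1 = ((k + 1 : Nat) : Int) + 1 := by push_cast; ring
      rw [hp]
      have ht : tri (k + 1) = tri k + ((k : Int) + 1) := tri_succ k
      have harr : k + 1 + (List.takeWhile (fun y => y == "O") xs).length
          = k + ((List.takeWhile (fun y => y == "O") xs).length + 1) := by omega
      rw [harr] at ihk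
      omega
    · rw [List.takeWhile_cons, List.dropWhile_cons]
      simp only [beq_iff_eq, hx, if_false]
      rw [go2]
      simp only [beq_iff_eq, hx, if_false]
      have h0 := ih 0
      have hd := alt_decomp xs
      have hs := alt_skip x xs hx
      simp only [Nat.cast_zero, zero_add, List.length_nil, Nat.add_zero] at h0 ⊢
      rw [hs, hd]
      have ht0 : tri 0 = 0 := by simp [tri]
      omega

-- ===== VERDICT (by name: the statement is the Claim_ definition above) =====
theorem count_grade_spec : Claim_equal_count_grade := by
  intro result _
  unfold Spec_count_grade count_grade
  rw [foldl_fst]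
  have h := go2_eq result 0
  have hd := alt_decomp result
  simp only [Nat.cast_zero, zero_add, tri] at h hd
  omega
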